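-- pv_equiv track=rewrite | github.com/lgelmi/advent_of_code | day11/day11.py | find_stable_visible_seats
-- ===== SOURCE A (Python) =====
-- import itertools
-- from typing import List, Set, Dict, Tuple, Optional, NewType, Iterator
--
-- SeatsMapType = List[List[Optional[bool]]]
--
-- def fill_seats(seats: SeatsMapType) -> SeatsMapType:
--     return [[True if state is not None else None for state in row] for row in seats]
--
-- def occupy_visible_seats(seats: SeatsMapType) -> SeatsMapType:
--     row_length = len(seats)
--     row_seats = list(range(row_length))
--     col_length = len(seats[0])
--     col_seats = list(range(col_length))
--     return [
--         [
--             should_be_occupied_visible(row, col, seats, row_length, col_length)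
--             for col in col_seats
--         ]
--         for row in row_seats
--     ]
--
-- def should_be_occupied_visible(
--     row: int, col: int, seats: SeatsMapType, row_length, col_length
-- ):
--     seat = seats[row][col]
--     if seat in [None, True]:
--         return seat
--     return visible_occupied(row, col, seats, row_length, col_length) == 0
--
-- def leave_visible_seats(seats: SeatsMapType) -> SeatsMapType:
--     row_length = len(seats)
--     row_seats = list(range(row_length))
--     col_length = len(seats[0])
--     col_seats = list(range(col_length))
--     return [
--         [
--             update_left_visible_state(row, col, seats, row_length, col_length)
--             for col in col_seats
--         ]
--         for row in row_seats
--     ]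
--
-- def update_left_visible_state(row: int, col: int, seats: SeatsMapType, row_length, col_length):
--     seat = seats[row][col]
--     if seat in [None, False]:
--         return seat
--     return visible_occupied(row, col, seats, row_length, col_length) < 5
--
-- def visible_occupied(row, col, seats: SeatsMapType, row_length, col_length) -> int:
--     return sum(
--         next((seats[x][y] for x, y in direction if seats[x][y] is not None), False)
--         for direction in vision_generators(row, col, row_length, col_length)
--     )
--
-- def vision_generators(
--     row, col, row_length, col_length
-- ) -> List[Iterator[Tuple[int, int]]]:
--     directions = list(itertools.product((0, -1, +1), (0, -1, +1)))[1:]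
--     return [
--         direction_generator(row, col, x, y, row_length, col_length)
--         for x, y in directions
--     ]
--
-- def direction_generator(row, col, x, y, row_length, col_length):
--     row += x
--     col += y
--     while 0 <= row < row_length and 0 <= col < col_length:
--         yield row, col
--         row += x
--         col += y
--
-- def find_stable_visible_seats(seats: SeatsMapType) -> SeatsMapType:
--     initial_state = fill_seats(seats)
--     step_behaviours = [leave_visible_seats, occupy_visible_seats]
--     for behaviour in itertools.cycle(step_behaviours):
--         new_state = behaviour(initial_state)
--         if new_state == initial_state:
--             return new_state
--         initial_state = new_state
-- ===== SOURCE B (Python) =====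
-- def find_stable_visible_seats(seats):
--     rows = len(seats)
--     cols = len(seats[0])
--     n = rows * cols
--     # flat row-major grid of the (truncated) layout
--     flat = [cell for row in seats for cell in row[:cols]]
--
--     def ray_first(r, c, dr, dc):
--         # first seat visible from (r, c) in direction (dr, dc), as a flat index
--         steps_r = rows + cols if dr == 0 else (r if dr < 0 else rows - 1 - r)
--         steps_c = rows + cols if dc == 0 else (c if dc < 0 else cols - 1 - c)
--         for k in range(1, min(steps_r, steps_c) + 1):
--             i = (r + k * dr) * cols + (c + k * dc)
--             if flat[i] is not None:
--                 return i
--         return None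
--
--     dirs = ((-1, -1), (-1, 0), (-1, 1), (0, -1), (0, 1), (1, -1), (1, 0), (1, 1))
--     nbrs = [[i for i in (ray_first(q // cols, q % cols, dr, dc) for dr, dc in dirs)
--              if i is not None]
--             for q in range(n)]
--
--     cur = [None if s is None else True for s in flat]
--     leave = True
--     while True:
--         nxt = []
--         for q in range(n):
--             s = cur[q]
--             if s is None:
--                 nxt.append(None)
--             else:
--                 occ = sum(1 for i in nbrs[q] if cur[i])
--                 nxt.append((s and occ < 5) if leave else (s or occ == 0))
--         if nxt == cur:
--             return [nxt[r * cols:(r + 1) * cols] for r in range(rows)]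
--         cur = nxt
--         leave = not leave
-- ===== Notes on version B (the rewrite author's own statement) =====
-- stated objective: faster
-- what changed: B flattens the grid to one row-major list and precomputes each cell's visible-seat flat indices once from the static layout (bounded range scan per direction), so every simulation step is a single flat pass of list lookups instead of re-walking eight rays per cell per step.
import Mathlib
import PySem

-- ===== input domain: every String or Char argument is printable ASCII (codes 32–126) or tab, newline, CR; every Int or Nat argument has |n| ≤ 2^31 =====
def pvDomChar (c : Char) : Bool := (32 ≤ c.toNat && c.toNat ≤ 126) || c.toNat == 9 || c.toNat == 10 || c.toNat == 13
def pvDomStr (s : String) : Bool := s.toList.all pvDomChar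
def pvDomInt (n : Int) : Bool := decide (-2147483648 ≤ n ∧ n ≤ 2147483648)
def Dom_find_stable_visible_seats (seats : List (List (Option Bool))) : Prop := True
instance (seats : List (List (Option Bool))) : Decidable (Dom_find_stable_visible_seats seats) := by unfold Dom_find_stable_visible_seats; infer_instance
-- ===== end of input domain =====

-- B flattens the grid to one row-major list, precomputes each cell's visible-seat flat indices
-- once (bounded-range scan per direction), then each step is a single pass of lookups (objective:
-- faster). Both Python loops run until a fixed point; the ports bound them by the same generous fuel.

-- ===== PORT A =====
-- A reads g[x][y] only under guards 0 <= x < rows, 0 <= y < cols, so plain getD is exact there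
def pvCell (g : List (List (Option Bool))) (x y : Int) : Option Bool :=
  (g.getD x.toNat []).getD y.toNat none

-- list(itertools.product((0, -1, +1), (0, -1, +1)))[1:]
def pvDirsA : List (Int × Int) :=
  [(0, -1), (0, 1), (-1, 0), (-1, -1), (-1, 1), (1, 0), (1, -1), (1, 1)]

def pvFillCellA : Option Bool → Option Bool
  | none => none
  | some _ => some true

def pvFillA (seats : List (List (Option Bool))) : List (List (Option Bool)) :=
  seats.map (fun row => row.map pvFillCellA)

-- next((seats[x][y] for x, y in direction_generator(...) if seats[x][y] is not None), False);
-- fuel ≥ rl + cl bounds the (always terminating) while-walk of direction_generator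
def pvRayA (state : List (List (Option Bool))) (rl cl dx dy : Int) : Nat → Int → Int → Bool
  | 0, _, _ => false
  | fuel + 1, x, y =>
    if 0 ≤ x ∧ x < rl ∧ 0 ≤ y ∧ y < cl then
      match pvCell state x y with
      | some b => b
      | none => pvRayA state rl cl dx dy fuel (x + dx) (y + dy)
    else false

def pvVisOccA (r c : Int) (state : List (List (Option Bool))) (rl cl : Int) : Int :=
  (pvDirsA.map (fun d =>
    if pvRayA state rl cl d.1 d.2 ((rl + cl).toNat + 1) (r + d.1) (c + d.2) then (1 : Int) else 0)).sum

def pvUpdLeftA (r c : Int) (state : List (List (Option Bool))) (rl cl : Int) : Option Bool :=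
  let seat := pvCell state r c
  if seat = none ∨ seat = some false then seat
  else some (decide (pvVisOccA r c state rl cl < 5))

def pvShouldOccA (r c : Int) (state : List (List (Option Bool))) (rl cl : Int) : Option Bool :=
  let seat := pvCell state r c
  if seat = none ∨ seat = some true then seat
  else some (decide (pvVisOccA r c state rl cl = 0))

def pvLeaveA (state : List (List (Option Bool))) : List (List (Option Bool)) :=
  (List.range state.length).map (fun (r : Nat) =>
    (List.range (state.getD 0 []).length).map (fun (c : Nat) =>
      pvUpdLeftA r c state state.length (state.getD 0 []).length))

def pvOccupyA (state : List (List (Option Bool))) : List (List (Option Bool)) :=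
  (List.range state.length).map (fun (r : Nat) =>
    (List.range (state.getD 0 []).length).map (fun (c : Nat) =>
      pvShouldOccA r c state state.length (state.getD 0 []).length))

-- for behaviour in itertools.cycle([leave, occupy]): …   (phase true = leave next)
def pvLoopA : Nat → Bool → List (List (Option Bool)) → List (List (Option Bool))
  | 0, _, state => state
  | fuel + 1, phase, state =>
    let new := if phase then pvLeaveA state else pvOccupyA state
    if new = state then new else pvLoopA fuel (!phase) new

def find_stable_visible_seats (seats : List (List (Option Bool))) : List (List (Option Bool)) :=
  pvLoopA (2 * seats.length * (seats.getD 0 []).length + 4) true (pvFillA seats)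

-- ===== PORT B =====
-- [cell for row in seats for cell in row[:cols]]  (row[:cols] with cols ≥ 0 is take)
def pvFlatB (seats : List (List (Option Bool))) (cols : Nat) : List (Option Bool) :=
  seats.flatMap (fun row => row.take cols)

-- first seat visible from (r, c) in direction (dr, dc), as a flat index:
-- for k in range(1, min(steps_r, steps_c) + 1): if flat[i] is not None: return i
def pvRayFirstB (flat : List (Option Bool)) (rows cols r c : Nat) (dr dc : Int) : Option Nat :=
  (((List.range (min (if dr = 0 then rows + cols else if dr < 0 then r else rows - 1 - r)
                     (if dc = 0 then rows + cols else if dc < 0 then c else cols - 1 - c))).map (fun (k : Nat) =>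
      ((((r : Int) + ((k : Int) + 1) * dr) * (cols : Int)) + ((c : Int) + ((k : Int) + 1) * dc)).toNat)).find?
    (fun i => (flat.getD i none).isSome))

def pvDirsB : List (Int × Int) :=
  [(-1, -1), (-1, 0), (-1, 1), (0, -1), (0, 1), (1, -1), (1, 0), (1, 1)]

def pvNbrsB (flat : List (Option Bool)) (rows cols n : Nat) : List (List Nat) :=
  (List.range n).map (fun q =>
    pvDirsB.filterMap (fun d => pvRayFirstB flat rows cols (q / cols) (q % cols) d.1 d.2))

def pvFillFlatB (flat : List (Option Bool)) : List (Option Bool) :=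
  flat.map (fun s => match s with | none => none | some _ => some true)

def pvStepB (n : Nat) (nbrs : List (List Nat)) (leave : Bool) (cur : List (Option Bool)) :
    List (Option Bool) :=
  (List.range n).map (fun q =>
    match cur.getD q none with
    | none => none
    | some s =>
      let occ : Nat := (nbrs.getD q []).countP (fun i => (cur.getD i none).getD false)
      if leave then some (s && decide (occ < 5)) else some (s || decide (occ = 0)))

def pvLoopB (n : Nat) (nbrs : List (List Nat)) : Nat → Bool → List (Option Bool) → List (Option Bool)
  | 0, _, cur => cur
  | fuel + 1, leave, cur =>
    let nxt := pvStepB n nbrs leave cur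
    if nxt = cur then nxt else pvLoopB n nbrs fuel (!leave) nxt

-- return [nxt[r*cols:(r+1)*cols] for r in range(rows)]  (nonnegative in-order slice = drop/take)
def find_stable_visible_seats_alt (seats : List (List (Option Bool))) : List (List (Option Bool)) :=
  let rows := seats.length
  let cols := (seats.getD 0 []).length
  let n := rows * cols
  let flat := pvFlatB seats cols
  let nbrs := pvNbrsB flat rows cols n
  let res := pvLoopB n nbrs (2 * n + 4) true (pvFillFlatB flat)
  (List.range rows).map (fun r => (res.drop (r * cols)).take cols)

-- ===== PRECONDITION & SPEC =====
-- Pre_ excludes exactly the inputs where the Python A raises IndexError: the empty grid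
-- (seats[0]) and grids with some row shorter than the first row (seats[row][col]).
def Pre_find_stable_visible_seats (seats : List (List (Option Bool))) : Prop :=
  seats ≠ [] ∧ ∀ row ∈ seats, (seats.getD 0 []).length ≤ row.length
instance (seats : List (List (Option Bool))) : Decidable (Pre_find_stable_visible_seats seats) := by
  unfold Pre_find_stable_visible_seats; infer_instance

def pvWitness_find_stable_visible_seats : List (List (Option Bool)) :=
  [[some false, none], [some true, some false]]

def Spec_find_stable_visible_seats (seats : List (List (Option Bool))) (out : List (List (Option Bool))) : Prop := out = find_stable_visible_seats_alt seats
instance (seats : List (List (Option Bool))) (out : List (List (Option Bool))) : Decidable (Spec_find_stable_visible_seats seats out) := by unfold Spec_find_stable_visible_seats; infer_instance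

-- ===== CLAIM (what is proved, stated in full; the proofs are below) =====
def Claim_equal_find_stable_visible_seats : Prop := ∀ (seats : List (List (Option Bool))), Dom_find_stable_visible_seats seats → Pre_find_stable_visible_seats seats → Spec_find_stable_visible_seats seats (find_stable_visible_seats seats)

-- ===== LEMMAS AND PROOFS =====

-- the grid a flat length-(R*C) list denotes
def pvChunk (R C : Nat) (f : List (Option Bool)) : List (List (Option Bool)) :=
  (List.range R).map (fun r => (List.range C).map (fun c => f.getD (r * C + c) none))

theorem getD_range_map {α : Type} (n : Nat) (f : Nat → α) (d : α) (i : Nat) (h : i < n) :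
    ((List.range n).map f).getD i d = f i := by
  rw [List.getD_eq_getElem?_getD, List.getElem?_map, List.getElem?_range h]
  rfl

theorem pvFlatB_length (seats : List (List (Option Bool))) (C : Nat)
    (h : ∀ row ∈ seats, C ≤ row.length) :
    (pvFlatB seats C).length = seats.length * C := by
  induction seats with
  | nil => simp [pvFlatB]
  | cons row rest ih =>
    have h1 : (row.take C).length = C := by
      simp [List.length_take, Nat.min_eq_left (h row (by simp))]
    have ih' := ih (fun r hr => h r (by simp [hr]))
    simp only [pvFlatB, List.flatMap_cons, List.length_append, h1] at ih' ⊢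
    rw [ih']
    simp [List.length_cons, Nat.succ_mul]
    ring

theorem pvFlatB_getD (seats : List (List (Option Bool))) (C : Nat)
    (h : ∀ row ∈ seats, C ≤ row.length) :
    ∀ (r c : Nat), r < seats.length → c < C →
      (pvFlatB seats C).getD (r * C + c) none = (seats.getD r []).getD c none := by
  induction seats with
  | nil => intro r c hr _; exact absurd hr (by simp)
  | cons row rest ih =>
    intro r c hr hc
    have h1 : (row.take C).length = C := by
      simp [List.length_take, Nat.min_eq_left (h row (by simp))]
    cases r with
    | zero =>
      simp only [pvFlatB, List.flatMap_cons, Nat.zero_mul, Nat.zero_add]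
      rw [List.getD_eq_getElem?_getD, List.getElem?_append_left (by omega),
        ← List.getD_eq_getElem?_getD]
      simp only [List.getD_eq_getElem?_getD, List.getElem?_take]
      simp [hc]
    | succ r =>
      have hidx : (r + 1) * C + c = (row.take C).length + (r * C + c) := by
        rw [h1]; ring
      simp only [pvFlatB, List.flatMap_cons]
      rw [List.getD_eq_getElem?_getD, hidx, List.getElem?_append_right (by omega),
        Nat.add_sub_cancel_left, ← List.getD_eq_getElem?_getD]
      exact ih (fun rw hrw => h rw (by simp [hrw])) r c (by simpa using hr) hc

-- the cell of a range-built grid at any coordinate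
theorem pvCell_range_map (rows cols : Nat) (f : Nat → Nat → Option Bool) (x y : Int) :
    pvCell ((List.range rows).map (fun (r : Nat) => (List.range cols).map (fun (c : Nat) => f r c))) x y =
      (if x.toNat < rows ∧ y.toNat < cols then f x.toNat y.toNat else none) := by
  unfold pvCell
  by_cases hx : x.toNat < rows
  · rw [getD_range_map rows _ _ _ hx]
    by_cases hy : y.toNat < cols
    · rw [getD_range_map cols _ _ _ hy]
      simp [hx, hy]
    · have h2 : ((List.range cols).map (fun (c : Nat) => f x.toNat c))[y.toNat]? = none :=
        List.getElem?_eq_none (by simpa using Nat.le_of_not_lt hy)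
      rw [List.getD_eq_getElem?_getD, h2]
      simp [hy]
  · have houter : ((List.range rows).map
        (fun (r : Nat) => (List.range cols).map (fun (c : Nat) => f r c))).getD x.toNat [] = [] := by
      have h1 : ((List.range rows).map
          (fun (r : Nat) => (List.range cols).map (fun (c : Nat) => f r c)))[x.toNat]? = none :=
        List.getElem?_eq_none (by simpa using Nat.le_of_not_lt hx)
      rw [List.getD_eq_getElem?_getD, h1]
      rfl
    rw [houter]
    simp [hx]

theorem pvCell_chunk (R C : Nat) (f : List (Option Bool)) (x y : Int) :
    pvCell (pvChunk R C f) x y =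
      (if x.toNat < R ∧ y.toNat < C then f.getD (x.toNat * C + y.toNat) none else none) :=
  pvCell_range_map R C (fun r c => f.getD (r * C + c) none) x y

-- valid ray positions form the prefix k = 1 .. min sr sc
theorem pvRaySteps_iff (R C r c : Nat) (dx dy : Int)
    (hdx : dx = -1 ∨ dx = 0 ∨ dx = 1) (hdy : dy = -1 ∨ dy = 0 ∨ dy = 1)
    (hne : ¬(dx = 0 ∧ dy = 0)) (hr : r < R) (hc : c < C) (k : Nat) (hk : 1 ≤ k) :
    (0 ≤ (r : Int) + k * dx ∧ (r : Int) + k * dx < R ∧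
     0 ≤ (c : Int) + k * dy ∧ (c : Int) + k * dy < C) ↔
      k ≤ min (if dx = 0 then R + C else if dx < 0 then r else R - 1 - r)
              (if dy = 0 then R + C else if dy < 0 then c else C - 1 - c) := by
  rcases hdx with rfl | rfl | rfl <;> rcases hdy with rfl | rfl | rfl <;>
    first
      | exact absurd ⟨rfl, rfl⟩ hne
      | (norm_num; omega)

-- (a*C+b).toNat for nonnegative a, b
theorem pvToNat_affine (a b : Int) (C : Nat) (ha : 0 ≤ a) (hb : 0 ≤ b) :
    (a * (C : Int) + b).toNat = a.toNat * C + b.toNat := by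
  obtain ⟨n, rfl⟩ := Int.eq_ofNat_of_zero_le ha
  obtain ⟨m, rfl⟩ := Int.eq_ofNat_of_zero_le hb
  norm_cast

-- A's ray walk equals lookup at the first pattern-matching flat index of the bounded scan
theorem pvRayA_eq_find (g : List (List (Option Bool))) (f flat0 : List (Option Bool))
    (R C : Nat) (dx dy : Int)
    (hdx : dx = -1 ∨ dx = 0 ∨ dx = 1) (hdy : dy = -1 ∨ dy = 0 ∨ dy = 1)
    (hne : ¬(dx = 0 ∧ dy = 0)) (r c : Nat) (hr : r < R) (hc : c < C)
    (W : ∀ x y : Int, 0 ≤ x → x < (R : Int) → 0 ≤ y → y < (C : Int) →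
      pvCell g x y = f.getD (x.toNat * C + y.toNat) none)
    (Pat : ∀ q < R * C, (f.getD q none).isSome = (flat0.getD q none).isSome) :
    ∀ (j fuel : Nat),
      j ≤ min (if dx = 0 then R + C else if dx < 0 then r else R - 1 - r)
              (if dy = 0 then R + C else if dy < 0 then c else C - 1 - c) →
      min (if dx = 0 then R + C else if dx < 0 then r else R - 1 - r)
          (if dy = 0 then R + C else if dy < 0 then c else C - 1 - c) - j ≤ fuel →
      pvRayA g R C dx dy fuel ((r : Int) + ((j : Int) + 1) * dx) ((c : Int) + ((j : Int) + 1) * dy) =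
        (match ((List.range' (j + 1)
              (min (if dx = 0 then R + C else if dx < 0 then r else R - 1 - r)
                   (if dy = 0 then R + C else if dy < 0 then c else C - 1 - c) - j)).map
            (fun (t : Nat) => ((((r : Int) + (t : Int) * dx) * (C : Int)) + ((c : Int) + (t : Int) * dy)).toNat)).find?
            (fun i => (flat0.getD i none).isSome) with
        | some i => (f.getD i none).getD false
        | none => false) := by
  set m := min (if dx = 0 then R + C else if dx < 0 then r else R - 1 - r)
               (if dy = 0 then R + C else if dy < 0 then c else C - 1 - c) with hm
  intro j fuel hj hfuel
  induction hd : m - j generalizing j fuel with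
  | zero =>
    have hiff := pvRaySteps_iff R C r c dx dy hdx hdy hne hr hc (j + 1) (by omega)
    rw [← hm] at hiff
    simp only [Nat.cast_add, Nat.cast_one] at hiff
    have hneg : ¬(0 ≤ (r : Int) + ((j : Int) + 1) * dx ∧ (r : Int) + ((j : Int) + 1) * dx < (R : Int) ∧
        0 ≤ (c : Int) + ((j : Int) + 1) * dy ∧ (c : Int) + ((j : Int) + 1) * dy < (C : Int)) := by
      rw [hiff]; omega
    cases fuel with
    | zero => simp [pvRayA]
    | succ fu =>
      simp only [pvRayA]
      rw [if_neg hneg]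
      simp
  | succ t ih =>
    have hiff := pvRaySteps_iff R C r c dx dy hdx hdy hne hr hc (j + 1) (by omega)
    rw [← hm] at hiff
    simp only [Nat.cast_add, Nat.cast_one] at hiff
    have hin := hiff.mpr (by omega)
    obtain ⟨hx0, hxR, hy0, hyC⟩ := hin
    obtain ⟨fu, rfl⟩ : ∃ fu, fuel = fu + 1 := ⟨fuel - 1, by omega⟩
    set x : Int := (r : Int) + ((j : Int) + 1) * dx with hxdef
    set y : Int := (c : Int) + ((j : Int) + 1) * dy with hydef
    clear_value x y
    have hidx : ((x * (C : Int)) + y).toNat = x.toNat * C + y.toNat :=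
      pvToNat_affine x y C hx0 hy0
    have hqlt : x.toNat * C + y.toNat < R * C := by
      have h1 : x.toNat < R := by omega
      have h2 : y.toNat < C := by omega
      calc x.toNat * C + y.toNat < x.toNat * C + C := by omega
        _ = (x.toNat + 1) * C := by ring
        _ ≤ R * C := Nat.mul_le_mul_right C (by omega)
    have hcellW : pvCell g x y = f.getD (x.toNat * C + y.toNat) none :=
      W x y hx0 hxR hy0 hyC
    have hrange : List.range' (j + 1) (t + 1) =
        (j + 1) :: List.range' (j + 1 + 1) t := List.range'_succ
    simp only [pvRayA]
    rw [if_pos ⟨hx0, hxR, hy0, hyC⟩]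
    rw [hrange]
    simp only [List.map_cons, List.find?_cons]
    have hhead : ((((r : Int) + ((j + 1 : Nat) : Int) * dx) * (C : Int)) +
        ((c : Int) + ((j + 1 : Nat) : Int) * dy)) = x * (C : Int) + y := by
      rw [hxdef, hydef]; push_cast; ring
    rw [hhead, hidx]
    have hpatq : (flat0.getD (x.toNat * C + y.toNat) none).isSome =
        (f.getD (x.toNat * C + y.toNat) none).isSome := (Pat _ hqlt).symm
    cases hcell : pvCell g x y with
    | some b =>
      have hfq : f.getD (x.toNat * C + y.toNat) none = some b := by rw [← hcellW, hcell]
      have hpat : (flat0.getD (x.toNat * C + y.toNat) none).isSome = true := by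
        rw [hpatq, hfq]; rfl
      rw [hpat]
      simp only [if_true]
      rw [hfq]
      rfl
    | none =>
      have hfq : f.getD (x.toNat * C + y.toNat) none = none := by rw [← hcellW, hcell]
      have hpat : (flat0.getD (x.toNat * C + y.toNat) none).isSome = false := by
        rw [hpatq, hfq]; rfl
      rw [hpat]
      simp only [Bool.false_eq_true, if_false]
      have hx1 : x + dx = (r : Int) + (((j + 1 : Nat) : Int) + 1) * dx := by
        rw [hxdef]; push_cast; ring
      have hy1 : y + dy = (c : Int) + (((j + 1 : Nat) : Int) + 1) * dy := by
        rw [hydef]; push_cast; ring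
      rw [hx1, hy1]
      exact ih (j + 1) fu (by omega) (by omega) (by omega)

-- 0/1-sum over per-direction booleans = count over the filterMapped neighbour list
theorem sum_eq_countP {δ π : Type} (ds : List δ) (f : δ → Bool) (g : δ → Option π) (val : π → Bool)
    (h : ∀ d ∈ ds, f d = (g d).elim false val) :
    (ds.map (fun d => if f d then (1 : Int) else 0)).sum = ((ds.filterMap g).countP val : Int) := by
  induction ds with
  | nil => rfl
  | cons d ds ih =>
    have hd := h d (by simp)
    have ih' := ih (fun e he => h e (by simp [he]))
    simp only [List.map_cons, List.sum_cons, List.filterMap_cons]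
    cases hg : g d with
    | none =>
      rw [hg, Option.elim_none] at hd
      rw [if_neg (by simp [hd]), ih']
      simp
    | some p =>
      rw [hg, Option.elim_some] at hd
      rw [List.countP_cons]
      by_cases hv : val p = true
      · rw [if_pos (by simp [hd, hv]), ih']
        simp [hv]
        ring
      · rw [if_neg (by simp [hd, hv]), ih']
        simp [hv]

-- A's per-direction visible boolean = lookup at B's precomputed first index
theorem pvRayA_eq_rayFirst (g : List (List (Option Bool))) (f flat0 : List (Option Bool))
    (R C : Nat) (d : Int × Int) (hd : d ∈ pvDirsB) (r c : Nat) (hr : r < R) (hc : c < C)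
    (W : ∀ x y : Int, 0 ≤ x → x < (R : Int) → 0 ≤ y → y < (C : Int) →
      pvCell g x y = f.getD (x.toNat * C + y.toNat) none)
    (Pat : ∀ q < R * C, (f.getD q none).isSome = (flat0.getD q none).isSome) :
    pvRayA g R C d.1 d.2 (((R : Int) + (C : Int)).toNat + 1) ((r : Int) + d.1) ((c : Int) + d.2) =
      (pvRayFirstB flat0 R C r c d.1 d.2).elim false (fun i => (f.getD i none).getD false) := by
  have hdirs : ∀ e ∈ pvDirsB, (e.1 = -1 ∨ e.1 = 0 ∨ e.1 = 1) ∧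
      (e.2 = -1 ∨ e.2 = 0 ∨ e.2 = 1) ∧ ¬(e.1 = 0 ∧ e.2 = 0) := by decide
  obtain ⟨hdx, hdy, hne⟩ := hdirs d hd
  have hmain := pvRayA_eq_find g f flat0 R C d.1 d.2 hdx hdy hne r c hr hc W Pat 0
    (((R : Int) + (C : Int)).toNat + 1) (by omega)
    (by
      have h1 : (if d.1 = 0 then R + C else if d.1 < 0 then r else R - 1 - r) ≤ R + C := by
        split_ifs <;> omega
      have h2 : (if d.2 = 0 then R + C else if d.2 < 0 then c else C - 1 - c) ≤ R + C := by
        split_ifs <;> omega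
      omega)
  have hstart : ((r : Int) + ((0 : Int) + 1) * d.1) = (r : Int) + d.1 := by ring
  have hstart2 : ((c : Int) + ((0 : Int) + 1) * d.2) = (c : Int) + d.2 := by ring
  rw [show ((0 : Nat) : Int) = (0 : Int) from rfl, hstart, hstart2] at hmain
  rw [hmain]
  unfold pvRayFirstB
  rw [Nat.sub_zero, Nat.zero_add]
  have hlist : List.range' 1 (min (if d.1 = 0 then R + C else if d.1 < 0 then r else R - 1 - r)
      (if d.2 = 0 then R + C else if d.2 < 0 then c else C - 1 - c)) =
      (List.range (min (if d.1 = 0 then R + C else if d.1 < 0 then r else R - 1 - r)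
      (if d.2 = 0 then R + C else if d.2 < 0 then c else C - 1 - c))).map (fun k => k + 1) := by
    rw [List.range'_eq_map_range]
    exact List.map_congr_left (fun k _ => Nat.add_comm 1 k)
  rw [hlist, List.map_map]
  have hmapeq : ∀ k : Nat,
      ((((r : Int) + (((k + 1 : Nat)) : Int) * d.1) * (C : Int)) + ((c : Int) + (((k + 1 : Nat)) : Int) * d.2)).toNat =
      ((((r : Int) + ((k : Int) + 1) * d.1) * (C : Int)) + ((c : Int) + ((k : Int) + 1) * d.2)).toNat := by
    intro k; push_cast; ring_nf
  have hfun : ((fun (t : Nat) => ((((r : Int) + (t : Int) * d.1) * (C : Int)) + ((c : Int) + (t : Int) * d.2)).toNat) ∘ (fun k => k + 1)) =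
      (fun k : Nat => ((((r : Int) + ((k : Int) + 1) * d.1) * (C : Int)) + ((c : Int) + ((k : Int) + 1) * d.2)).toNat) := by
    funext k
    simp only [Function.comp_apply]
    exact hmapeq k
  rw [hfun]
  cases hfind : List.find? (fun i => (flat0.getD i none).isSome)
      ((List.range (min (if d.1 = 0 then R + C else if d.1 < 0 then r else R - 1 - r)
          (if d.2 = 0 then R + C else if d.2 < 0 then c else C - 1 - c))).map
        (fun (k : Nat) => ((((r : Int) + ((k : Int) + 1) * d.1) * (C : Int)) + ((c : Int) + ((k : Int) + 1) * d.2)).toNat)) with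
  | none => rfl
  | some i => rfl

-- occupied-visible counts agree (A's Int sum over its direction order vs B's countP)
theorem pvVisOcc_eq (g : List (List (Option Bool))) (f flat0 : List (Option Bool))
    (R C : Nat) (r c : Nat) (hr : r < R) (hc : c < C)
    (W : ∀ x y : Int, 0 ≤ x → x < (R : Int) → 0 ≤ y → y < (C : Int) →
      pvCell g x y = f.getD (x.toNat * C + y.toNat) none)
    (Pat : ∀ q < R * C, (f.getD q none).isSome = (flat0.getD q none).isSome) :
    pvVisOccA r c g R C =
      ((pvDirsB.filterMap (fun d => pvRayFirstB flat0 R C r c d.1 d.2)).countP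
        (fun i => (f.getD i none).getD false) : Int) := by
  unfold pvVisOccA
  have hperm : pvDirsA.Perm pvDirsB := by decide
  rw [List.Perm.sum_eq (hperm.map _)]
  exact sum_eq_countP pvDirsB _ _ _
    (fun d hd => pvRayA_eq_rayFirst g f flat0 R C d hd r c hr hc W Pat)

-- q = r*C + c decodes back to (r, c)
theorem pvDecode (R C r c : Nat) (hr : r < R) (hc : c < C) :
    (r * C + c) / C = r ∧ (r * C + c) % C = c ∧ r * C + c < R * C := by
  refine ⟨?_, ?_, ?_⟩
  · rw [Nat.mul_comm r C, Nat.mul_add_div (by omega)]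
    simp [Nat.div_eq_of_lt hc]
  · rw [Nat.mul_comm r C, Nat.mul_add_mod]
    exact Nat.mod_eq_of_lt hc
  · calc r * C + c < r * C + C := by omega
      _ = (r + 1) * C := by ring
      _ ≤ R * C := Nat.mul_le_mul_right C (by omega)

-- one A step (on a grid of shape R×C window-agreeing with f) = chunk of one B step
theorem pvStepA_eq_chunk (seats g : List (List (Option Bool))) (f : List (Option Bool))
    (phase : Bool)
    (hR : g.length = seats.length) (hC : (g.getD 0 []).length = (seats.getD 0 []).length)
    (W : ∀ x y : Int, 0 ≤ x → x < (seats.length : Int) → 0 ≤ y → y < ((seats.getD 0 []).length : Int) →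
      pvCell g x y = f.getD (x.toNat * (seats.getD 0 []).length + y.toNat) none)
    (Pat : ∀ q < seats.length * (seats.getD 0 []).length,
      (f.getD q none).isSome = ((pvFlatB seats (seats.getD 0 []).length).getD q none).isSome) :
    (if phase then pvLeaveA g else pvOccupyA g) =
      pvChunk seats.length (seats.getD 0 []).length
        (pvStepB (seats.length * (seats.getD 0 []).length)
          (pvNbrsB (pvFlatB seats (seats.getD 0 []).length) seats.length (seats.getD 0 []).length
            (seats.length * (seats.getD 0 []).length)) phase f) := by
  set R := seats.length
  set C := (seats.getD 0 []).length
  set flat0 := pvFlatB seats C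
  have hbody : ∀ r c : Nat, r < R → c < C →
      (if phase then pvUpdLeftA r c g R C else pvShouldOccA r c g R C) =
        (pvStepB (R * C) (pvNbrsB flat0 R C (R * C)) phase f).getD (r * C + c) none := by
    intro r c hr hc
    obtain ⟨hdiv, hmod, hlt⟩ := pvDecode R C r c hr hc
    have hcellg : pvCell g r c = f.getD (r * C + c) none := by
      have := W r c (by omega) (by exact_mod_cast hr) (by omega) (by exact_mod_cast hc)
      simpa using this
    have hnbrs : (pvNbrsB flat0 R C (R * C)).getD (r * C + c) [] =
        pvDirsB.filterMap (fun d => pvRayFirstB flat0 R C r c d.1 d.2) := by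
      unfold pvNbrsB
      rw [getD_range_map _ _ _ _ hlt, hdiv, hmod]
    have hocc := pvVisOcc_eq g f flat0 R C r c hr hc W Pat
    unfold pvStepB
    rw [getD_range_map _ _ _ _ hlt, hnbrs]
    unfold pvUpdLeftA pvShouldOccA
    rw [hcellg]
    cases hfq : f.getD (r * C + c) none with
    | none => cases phase <;> simp
    | some b =>
      have hocc' : pvVisOccA r c g R C =
          ((pvDirsB.filterMap (fun d => pvRayFirstB flat0 R C r c d.1 d.2)).countP
            (fun i => (f.getD i none).getD false) : Int) := hocc
      cases phase with
      | true =>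
        cases b with
        | true =>
          simp only [if_true, reduceCtorEq, Option.some.injEq, or_self, if_false,
            Bool.true_and]
          rw [hocc']
          congr 1
          exact propext (by omega)
        | false => simp
      | false =>
        cases b with
        | true => simp
        | false =>
          simp only [Bool.false_eq_true, if_false, reduceCtorEq, Option.some.injEq, or_self,
            Bool.false_or]
          rw [hocc']
          congr 1
          exact propext (by omega)
  cases phase with
  | true =>
    rw [if_pos rfl]
    unfold pvLeaveA pvChunk
    rw [hR, hC]
    refine List.map_eq_map_iff.mpr ?_
    intro r hrm
    refine List.map_eq_map_iff.mpr ?_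
    intro c hcm
    rw [List.mem_range] at hrm hcm
    have := hbody r c hrm hcm
    simpa using this
  | false =>
    simp only [Bool.false_eq_true, if_false]
    unfold pvOccupyA pvChunk
    rw [hR, hC]
    refine List.map_eq_map_iff.mpr ?_
    intro r hrm
    refine List.map_eq_map_iff.mpr ?_
    intro c hcm
    rw [List.mem_range] at hrm hcm
    have := hbody r c hrm hcm
    simpa using this

-- pvStepB output: length and None-pattern
theorem pvStepB_length (n : Nat) (nbrs : List (List Nat)) (phase : Bool) (f : List (Option Bool)) :
    (pvStepB n nbrs phase f).length = n := by
  simp [pvStepB]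

theorem pvStepB_pattern (n : Nat) (nbrs : List (List Nat)) (phase : Bool) (f : List (Option Bool))
    (q : Nat) (hq : q < n) :
    ((pvStepB n nbrs phase f).getD q none).isSome = (f.getD q none).isSome := by
  unfold pvStepB
  rw [getD_range_map _ _ _ _ hq]
  cases f.getD q none with
  | none => rfl
  | some b => cases phase <;> rfl

-- two length-n flats with equal chunks are equal (C > 0 or n = 0)
theorem pvChunk_inj (R C : Nat) (f f' : List (Option Bool))
    (hf : f.length = R * C) (hf' : f'.length = R * C)
    (h : ∀ q < R * C, f.getD q none = f'.getD q none) : f = f' := by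
  apply List.ext_getElem (by omega)
  intro q h1 h2
  have hq : q < R * C := by omega
  have := h q hq
  rwa [List.getD_eq_getElem f none (by omega), List.getD_eq_getElem f' none (by omega)] at this

-- chunk entries read back
theorem pvChunk_getD (R C : Nat) (f : List (Option Bool)) (r c : Nat) (hr : r < R) (hc : c < C) :
    ((pvChunk R C f).getD r []).getD c none = f.getD (r * C + c) none := by
  unfold pvChunk
  rw [getD_range_map _ _ _ _ hr, getD_range_map _ _ _ _ hc]

-- window agreement holds between a chunk and its flat
theorem pvChunk_W (R C : Nat) (f : List (Option Bool)) :
    ∀ x y : Int, 0 ≤ x → x < (R : Int) → 0 ≤ y → y < (C : Int) →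
      pvCell (pvChunk R C f) x y = f.getD (x.toNat * C + y.toNat) none := by
  intro x y hx0 hxR hy0 hyC
  rw [pvCell_chunk]
  rw [if_pos ⟨by omega, by omega⟩]

-- grids chunked from equal-length flats are equal iff the flats are
theorem pvChunk_eq_iff (R C : Nat) (f f' : List (Option Bool))
    (hf : f.length = R * C) (hf' : f'.length = R * C) :
    pvChunk R C f = pvChunk R C f' ↔ f = f' := by
  constructor
  · intro h
    apply pvChunk_inj R C f f' hf hf'
    intro q hq
    have hC : 0 < C := by
      rcases Nat.eq_zero_or_pos C with h0 | h0
      · subst h0; simp at hq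
      · exact h0
    have hr : q / C < R := Nat.div_lt_of_lt_mul (by rwa [Nat.mul_comm] at hq)
    have hc : q % C < C := Nat.mod_lt _ hC
    have := congrArg (fun l => (l.getD (q / C) []).getD (q % C) none) h
    simp only at this
    rw [pvChunk_getD R C f _ _ hr hc, pvChunk_getD R C f' _ _ hr hc] at this
    have hqeq : q / C * C + q % C = q := by
      rw [Nat.mul_comm]
      exact Nat.div_add_mod q C
    rwa [hqeq] at this
  · intro h; rw [h]

-- the flat fill: entries, length, pattern
theorem pvFillFlatB_getD (flat : List (Option Bool)) (q : Nat) :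
    (pvFillFlatB flat).getD q none =
      (match flat.getD q none with | none => none | some _ => some true) := by
  unfold pvFillFlatB
  rw [List.getD_eq_getElem?_getD, List.getD_eq_getElem?_getD, List.getElem?_map]
  cases flat[q]? with
  | none => rfl
  | some x => cases x <;> rfl

-- slicing a length-(R*C) flat row by row is chunking it
theorem pvSlices_eq_chunk (R C : Nat) (f : List (Option Bool)) (hf : f.length = R * C) :
    (List.range R).map (fun r => (f.drop (r * C)).take C) = pvChunk R C f := by
  unfold pvChunk
  refine List.map_eq_map_iff.mpr ?_
  intro r hr
  rw [List.mem_range] at hr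
  have hrc : r * C + C ≤ R * C := by
    calc r * C + C = (r + 1) * C := by ring
      _ ≤ R * C := Nat.mul_le_mul_right C (by omega)
  apply List.ext_getElem
  · simp only [List.length_take, List.length_drop, List.length_map, List.length_range, hf]
    omega
  · intro i h1 h2
    have hi : i < C := by
      simp only [List.length_take, List.length_drop, hf] at h1
      omega
    have hidx : r * C + i < f.length := by omega
    rw [List.getElem_take, List.getElem_drop]
    rw [List.getElem_map, List.getElem_range]
    rw [List.getD_eq_getElem f none (by omega)]

-- pvLoopB preserves the length
theorem pvLoopB_length (n : Nat) (nbrs : List (List Nat)) :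
    ∀ (fuel : Nat) (phase : Bool) (f : List (Option Bool)), f.length = n →
      (pvLoopB n nbrs fuel phase f).length = n := by
  intro fuel
  induction fuel with
  | zero => intro phase f hf; exact hf
  | succ t ih =>
    intro phase f hf
    simp only [pvLoopB]
    by_cases h : pvStepB n nbrs phase f = f
    · rw [if_pos h, h]; exact hf
    · rw [if_neg h]; exact ih _ _ (pvStepB_length n nbrs phase f)

-- main loop correspondence once the state is a chunk of the flat
theorem pvLoop_eq (seats : List (List (Option Bool))) (hRpos : 0 < seats.length) :
    ∀ (fuel : Nat) (phase : Bool) (f : List (Option Bool)),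
      f.length = seats.length * (seats.getD 0 []).length →
      (∀ q < seats.length * (seats.getD 0 []).length,
        (f.getD q none).isSome = ((pvFlatB seats (seats.getD 0 []).length).getD q none).isSome) →
      pvLoopA fuel phase (pvChunk seats.length (seats.getD 0 []).length f) =
        pvChunk seats.length (seats.getD 0 []).length
          (pvLoopB (seats.length * (seats.getD 0 []).length)
            (pvNbrsB (pvFlatB seats (seats.getD 0 []).length) seats.length
              (seats.getD 0 []).length (seats.length * (seats.getD 0 []).length))
            fuel phase f) := by
  intro fuel
  induction fuel with
  | zero => intro phase f _ _; rfl
  | succ t ih =>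
    intro phase f hlen hpat
    set R := seats.length with hRdef
    set C := (seats.getD 0 []).length with hCdef
    have hshape1 : (pvChunk R C f).length = R := by simp [pvChunk]
    have hshape2 : ((pvChunk R C f).getD 0 []).length = C := by
      unfold pvChunk
      rw [getD_range_map _ _ _ 0 hRpos]
      simp
    have hstep := pvStepA_eq_chunk seats (pvChunk R C f) f phase hshape1 hshape2
      (pvChunk_W R C f) hpat
    have hlen' : (pvStepB (R * C) (pvNbrsB (pvFlatB seats C) R C (R * C)) phase f).length = R * C :=
      pvStepB_length _ _ _ _
    simp only [pvLoopA, pvLoopB]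
    rw [hstep]
    by_cases heq : pvStepB (R * C) (pvNbrsB (pvFlatB seats C) R C (R * C)) phase f = f
    · rw [if_pos heq, heq, if_pos rfl]
    · have hneq : pvChunk R C (pvStepB (R * C) (pvNbrsB (pvFlatB seats C) R C (R * C)) phase f) ≠
          pvChunk R C f := by
        intro h
        exact heq ((pvChunk_eq_iff R C _ f hlen' hlen).mp h)
      rw [if_neg hneq, if_neg heq]
      exact ih (!phase) _ hlen'
        (fun q hq => by rw [pvStepB_pattern _ _ _ _ q hq]; exact hpat q hq)

-- getD through a map that fixes the default
theorem getD_map_none (l : List (Option Bool)) (g : Option Bool → Option Bool)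
    (hg : g none = none) (i : Nat) : (l.map g).getD i none = g (l.getD i none) := by
  rw [List.getD_eq_getElem?_getD, List.getElem?_map, List.getD_eq_getElem?_getD]
  cases l[i]? with
  | none => simp [hg]
  | some v => rfl

-- fill: rows read back
theorem pvFill_getD (seats : List (List (Option Bool))) (i : Nat) :
    (pvFillA seats).getD i [] = (seats.getD i []).map pvFillCellA := by
  unfold pvFillA
  rw [List.getD_eq_getElem?_getD, List.getElem?_map, List.getD_eq_getElem?_getD]
  cases seats[i]? <;> rfl

-- one controlled unfolding of each loop
theorem pvLoopA_succ_t (fuel : Nat) (state : List (List (Option Bool))) :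
    pvLoopA (fuel + 1) true state =
      if pvLeaveA state = state then pvLeaveA state
      else pvLoopA fuel false (pvLeaveA state) := rfl

theorem pvLoopA_succ_f (fuel : Nat) (state : List (List (Option Bool))) :
    pvLoopA (fuel + 1) false state =
      if pvOccupyA state = state then pvOccupyA state
      else pvLoopA fuel true (pvOccupyA state) := rfl

theorem pvLoopB_succ_t (n : Nat) (nbrs : List (List Nat)) (fuel : Nat)
    (cur : List (Option Bool)) :
    pvLoopB n nbrs (fuel + 1) true cur =
      if pvStepB n nbrs true cur = cur then pvStepB n nbrs true cur
      else pvLoopB n nbrs fuel false (pvStepB n nbrs true cur) := rfl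

-- ===== VERDICT (by name: the statement is the Claim_ definition above) =====
theorem find_stable_visible_seats_spec : Claim_equal_find_stable_visible_seats := by
  intro seats _ hpre
  obtain ⟨hnil, hrows⟩ := hpre
  unfold Spec_find_stable_visible_seats
  have hRpos : 0 < seats.length := by
    cases seats with
    | nil => exact absurd rfl hnil
    | cons a l => simp
  have hflatlen : (pvFlatB seats (seats.getD 0 []).length).length =
      seats.length * (seats.getD 0 []).length :=
    pvFlatB_length seats (seats.getD 0 []).length hrows
  have hf0len : (pvFillFlatB (pvFlatB seats (seats.getD 0 []).length)).length =
      seats.length * (seats.getD 0 []).length := by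
    unfold pvFillFlatB
    rw [List.length_map]
    exact hflatlen
  have hpat0 : ∀ q < seats.length * (seats.getD 0 []).length,
      ((pvFillFlatB (pvFlatB seats (seats.getD 0 []).length)).getD q none).isSome =
        ((pvFlatB seats (seats.getD 0 []).length).getD q none).isSome := by
    intro q hq
    rw [pvFillFlatB_getD]
    cases (pvFlatB seats (seats.getD 0 []).length).getD q none <;> rfl
  have hf0tb : ∀ q, (pvFillFlatB (pvFlatB seats (seats.getD 0 []).length)).getD q none = none ∨
      (pvFillFlatB (pvFlatB seats (seats.getD 0 []).length)).getD q none = some true := by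
    intro q
    rw [pvFillFlatB_getD]
    cases (pvFlatB seats (seats.getD 0 []).length).getD q none with
    | none => exact Or.inl rfl
    | some b => exact Or.inr rfl
  have hg0len : (pvFillA seats).length = seats.length := by simp [pvFillA]
  have hg0row : ((pvFillA seats).getD 0 []).length = (seats.getD 0 []).length := by
    rw [pvFill_getD]
    simp
  have hW0 : ∀ x y : Int, 0 ≤ x → x < (seats.length : Int) → 0 ≤ y →
      y < ((seats.getD 0 []).length : Int) →
      pvCell (pvFillA seats) x y =
        (pvFillFlatB (pvFlatB seats (seats.getD 0 []).length)).getD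
          (x.toNat * (seats.getD 0 []).length + y.toNat) none := by
    intro x y hx0 hxR hy0 hyC
    have hxa : x.toNat < seats.length := by omega
    have hya : y.toNat < (seats.getD 0 []).length := by omega
    unfold pvCell
    rw [pvFill_getD, getD_map_none (seats.getD x.toNat []) pvFillCellA rfl y.toNat,
      pvFillFlatB_getD,
      pvFlatB_getD seats (seats.getD 0 []).length hrows x.toNat y.toNat hxa hya]
    cases (seats.getD x.toNat []).getD y.toNat none <;> rfl
  have hstep1 := pvStepA_eq_chunk seats (pvFillA seats)
    (pvFillFlatB (pvFlatB seats (seats.getD 0 []).length)) true hg0len hg0row hW0 hpat0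
  rw [if_pos rfl] at hstep1
  have hchunklen : (pvChunk seats.length (seats.getD 0 []).length
      (pvFillFlatB (pvFlatB seats (seats.getD 0 []).length))).length = seats.length := by
    simp [pvChunk]
  have hchunkrow : ((pvChunk seats.length (seats.getD 0 []).length
      (pvFillFlatB (pvFlatB seats (seats.getD 0 []).length))).getD 0 []).length =
      (seats.getD 0 []).length := by
    unfold pvChunk
    rw [getD_range_map _ _ _ 0 hRpos]
    simp
  have hfA : 2 * seats.length * (seats.getD 0 []).length + 4 =
      (2 * (seats.length * (seats.getD 0 []).length) + 3) + 1 := by ring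
  have hfB : 2 * (seats.length * (seats.getD 0 []).length) + 4 =
      (2 * (seats.length * (seats.getD 0 []).length) + 3) + 1 := by ring
  simp only [find_stable_visible_seats, find_stable_visible_seats_alt]
  rw [hfA, hfB, pvLoopA_succ_t, pvLoopB_succ_t]
  by_cases hcase : pvStepB (seats.length * (seats.getD 0 []).length)
      (pvNbrsB (pvFlatB seats (seats.getD 0 []).length) seats.length
        (seats.getD 0 []).length (seats.length * (seats.getD 0 []).length)) true
      (pvFillFlatB (pvFlatB seats (seats.getD 0 []).length)) =
      pvFillFlatB (pvFlatB seats (seats.getD 0 []).length)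
  · -- B's very first step is already a fixed point of the flat loop
    rw [if_pos hcase, hcase, pvSlices_eq_chunk _ _ _ hf0len]
    have hocc0 : pvOccupyA (pvChunk seats.length (seats.getD 0 []).length
        (pvFillFlatB (pvFlatB seats (seats.getD 0 []).length))) =
        pvChunk seats.length (seats.getD 0 []).length
          (pvFillFlatB (pvFlatB seats (seats.getD 0 []).length)) := by
      have h := pvStepA_eq_chunk seats
        (pvChunk seats.length (seats.getD 0 []).length
          (pvFillFlatB (pvFlatB seats (seats.getD 0 []).length)))
        (pvFillFlatB (pvFlatB seats (seats.getD 0 []).length)) false hchunklen hchunkrow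
        (pvChunk_W _ _ _) hpat0
    -- occupy keeps an all-(None/True) grid unchanged
      rw [if_neg (by simp)] at h
      have hsb : pvStepB (seats.length * (seats.getD 0 []).length)
          (pvNbrsB (pvFlatB seats (seats.getD 0 []).length) seats.length
            (seats.getD 0 []).length (seats.length * (seats.getD 0 []).length)) false
          (pvFillFlatB (pvFlatB seats (seats.getD 0 []).length)) =
          pvFillFlatB (pvFlatB seats (seats.getD 0 []).length) := by
        apply pvChunk_inj seats.length (seats.getD 0 []).length _ _
          (pvStepB_length _ _ _ _) hf0len
        intro q hq
        unfold pvStepB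
        rw [getD_range_map _ _ _ _ hq]
        rcases hf0tb q with h0 | h0 <;> rw [h0] <;> rfl
      rw [h, hsb]
    by_cases hg : pvLeaveA (pvFillA seats) = pvFillA seats
    · rw [if_pos hg, hstep1, hcase]
    · rw [if_neg hg, hstep1, hcase]
      have h23 : 2 * (seats.length * (seats.getD 0 []).length) + 3 =
          (2 * (seats.length * (seats.getD 0 []).length) + 2) + 1 := by ring
      rw [h23, pvLoopA_succ_f, if_pos hocc0, hocc0]
  · -- otherwise both loops advance in lockstep
    have hf1len : (pvStepB (seats.length * (seats.getD 0 []).length)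
        (pvNbrsB (pvFlatB seats (seats.getD 0 []).length) seats.length
          (seats.getD 0 []).length (seats.length * (seats.getD 0 []).length)) true
        (pvFillFlatB (pvFlatB seats (seats.getD 0 []).length))).length =
        seats.length * (seats.getD 0 []).length := pvStepB_length _ _ _ _
    have hgneq : pvLeaveA (pvFillA seats) ≠ pvFillA seats := by
      intro hgeq
      apply hcase
      rcases Nat.eq_zero_or_pos (seats.length * (seats.getD 0 []).length) with hN0 | hNpos
      · have h2 : pvFillFlatB (pvFlatB seats (seats.getD 0 []).length) = [] :=
          List.length_eq_zero_iff.mp (by omega)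
        have h1 : pvStepB (seats.length * (seats.getD 0 []).length)
            (pvNbrsB (pvFlatB seats (seats.getD 0 []).length) seats.length
              (seats.getD 0 []).length (seats.length * (seats.getD 0 []).length)) true
            (pvFillFlatB (pvFlatB seats (seats.getD 0 []).length)) = [] := by
          unfold pvStepB
          rw [hN0]
          rfl
        rw [h1, h2]
      · have hCpos : 0 < (seats.getD 0 []).length := by
          rcases Nat.eq_zero_or_pos (seats.getD 0 []).length with h0 | h0
          · rw [h0, Nat.mul_zero] at hNpos; omega
          · exact h0
        apply pvChunk_inj seats.length (seats.getD 0 []).length _ _ hf1len hf0len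
        intro q hq
        have hr : q / (seats.getD 0 []).length < seats.length :=
          Nat.div_lt_of_lt_mul (by rwa [Nat.mul_comm] at hq)
        have hc : q % (seats.getD 0 []).length < (seats.getD 0 []).length :=
          Nat.mod_lt _ hCpos
        have hqeq : q / (seats.getD 0 []).length * (seats.getD 0 []).length +
            q % (seats.getD 0 []).length = q := by
          rw [Nat.mul_comm]
          exact Nat.div_add_mod q (seats.getD 0 []).length
        have e1 := pvChunk_getD seats.length (seats.getD 0 []).length
          (pvStepB (seats.length * (seats.getD 0 []).length)
            (pvNbrsB (pvFlatB seats (seats.getD 0 []).length) seats.length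
              (seats.getD 0 []).length (seats.length * (seats.getD 0 []).length)) true
            (pvFillFlatB (pvFlatB seats (seats.getD 0 []).length)))
          (q / (seats.getD 0 []).length) (q % (seats.getD 0 []).length) hr hc
        rw [hqeq, ← hstep1, hgeq] at e1
        obtain ⟨qr, hqr⟩ : ∃ v : Nat, q / (seats.getD 0 []).length = v := ⟨_, rfl⟩
        obtain ⟨qc, hqc⟩ : ∃ v : Nat, q % (seats.getD 0 []).length = v := ⟨_, rfl⟩
        rw [hqr] at hr hqeq e1
        rw [hqc] at hc hqeq e1
        have e2 := hW0 (qr : Int) (qc : Int)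
          (Int.natCast_nonneg _) (by exact_mod_cast hr)
          (Int.natCast_nonneg _) (by exact_mod_cast hc)
        unfold pvCell at e2
        simp only [Int.toNat_natCast] at e2
        rw [hqeq] at e2
        rw [← e1, e2]
    rw [if_neg hgneq, if_neg hcase, hstep1]
    have hpat1 : ∀ q < seats.length * (seats.getD 0 []).length,
        ((pvStepB (seats.length * (seats.getD 0 []).length)
          (pvNbrsB (pvFlatB seats (seats.getD 0 []).length) seats.length
            (seats.getD 0 []).length (seats.length * (seats.getD 0 []).length)) true
          (pvFillFlatB (pvFlatB seats (seats.getD 0 []).length))).getD q none).isSome =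
          ((pvFlatB seats (seats.getD 0 []).length).getD q none).isSome := by
      intro q hq
      rw [pvStepB_pattern _ _ _ _ q hq]
      exact hpat0 q hq
    rw [pvLoop_eq seats hRpos (2 * (seats.length * (seats.getD 0 []).length) + 3) false _
      hf1len hpat1]
    rw [pvSlices_eq_chunk _ _ _ (pvLoopB_length _ _ _ _ _ hf1len)]
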